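-- pv_equiv track=rewrite | github.com/DomNelson/msprime-abc | scripts/wf_trace.py | region_overlap
-- ===== SOURCE A (Python) =====
-- def region_overlap(regions):
--     """
--     Returns a dict with format {(*old_regions_ix,): new_region} where
--     each new_region has a unique coalescence pattern
--     """
--     points = sorted(set().union(*regions))
--
--     for i in range(len(points)-1):
--         old_regions = tuple([j for j, r in enumerate(regions)
--                               if r[0] <= points[i] < r[1]])
--         new_regions = (points[i], points[i+1])
--
--         ## No old_regions indicates disjoint regions
--         if len(old_regions) > 0:
--             yield old_regions, new_regions
-- ===== SOURCE B (Python) =====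
-- def region_overlap(regions):
--     """Sweep line: events at interval starts/ends, one pass over the sorted
--     breakpoints maintaining the set of active region indices."""
--     points = sorted(set().union(*regions))
--     starts = {}
--     ends = {}
--     for j, r in enumerate(regions):
--         # an interval only ever covers a point when r[0] < r[1]
--         if len(r) >= 2 and r[0] < r[1]:
--             starts.setdefault(r[0], []).append(j)
--             ends.setdefault(r[1], []).append(j)
--     active = set()
--     for i in range(len(points) - 1):
--         p = points[i]
--         active.difference_update(ends.get(p, []))
--         active.update(starts.get(p, []))
--         if active:
--             yield tuple(sorted(active)), (p, points[i + 1])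
-- ===== Notes on version B (the rewrite author's own statement) =====
-- stated objective: faster
-- what changed: Replaced A's per-gap rescan of every region by a sweep line: start/end events are bucketed once per region, then one pass over the sorted breakpoints maintains the set of active region indices.
import Mathlib
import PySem

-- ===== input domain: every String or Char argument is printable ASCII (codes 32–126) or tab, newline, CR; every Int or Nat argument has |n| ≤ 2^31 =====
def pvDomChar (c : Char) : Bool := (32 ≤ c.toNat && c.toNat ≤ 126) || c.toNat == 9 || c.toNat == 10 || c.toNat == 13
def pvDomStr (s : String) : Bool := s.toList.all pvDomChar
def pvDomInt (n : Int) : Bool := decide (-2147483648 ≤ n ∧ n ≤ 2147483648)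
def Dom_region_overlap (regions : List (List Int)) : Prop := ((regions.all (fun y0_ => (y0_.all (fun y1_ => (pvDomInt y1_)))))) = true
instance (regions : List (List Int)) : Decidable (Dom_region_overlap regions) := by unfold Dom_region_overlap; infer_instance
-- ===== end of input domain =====

-- B replaces A's per-gap rescan of all regions by a sweep line over start/end events with an
-- active index set (objective: faster). Return value only: A is a generator, compared as its list of yields.

-- ===== PORT A =====
-- points = sorted(set().union(*regions))
def pvPoints (regions : List (List Int)) : List Int :=
  PySem.List.sorted (PySem.Set.ofList regions.flatten) (fun x => x) false

-- [j for j, r in enumerate(regions) if r[0] <= p < r[1]]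
def pvOld (regions : List (List Int)) (p : Int) : List Int :=
  ((PySem.List.enumerate regions 0).filter
    (fun jr => decide (PySem.List.pyGetD jr.2 0 0 ≤ p ∧ p < PySem.List.pyGetD jr.2 1 0))).map
    (fun jr => jr.1)

-- one iteration of A's loop over i (yields are collected into the accumulator)
def pvABody (regions : List (List Int)) (points : List Int)
    (acc : List (List Int × (Int × Int))) (i : Int) : List (List Int × (Int × Int)) :=
  let old := pvOld regions (PySem.List.pyGetD points i 0)
  if 0 < old.length then
    acc ++ [(old, (PySem.List.pyGetD points i 0, PySem.List.pyGetD points (i + 1) 0))]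
  else acc

def region_overlap (regions : List (List Int)) : List (List Int × (Int × Int)) :=
  let points := pvPoints regions
  (PySem.List.pyRange 0 ((points.length : Int) - 1)).foldl (pvABody regions points) []

-- ===== PORT B =====
-- starts.setdefault(r[0], []).append(j); ends.setdefault(r[1], []).append(j)  (for proper intervals)
def pvEvStep (se : PySem.Dict Int (List Int) × PySem.Dict Int (List Int)) (jr : Int × List Int) :
    PySem.Dict Int (List Int) × PySem.Dict Int (List Int) :=
  if 2 ≤ jr.2.length ∧ PySem.List.pyGetD jr.2 0 0 < PySem.List.pyGetD jr.2 1 0 then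
    (PySem.Dict.insert se.1 (PySem.List.pyGetD jr.2 0 0)
       (PySem.Dict.getD se.1 (PySem.List.pyGetD jr.2 0 0) [] ++ [jr.1]),
     PySem.Dict.insert se.2 (PySem.List.pyGetD jr.2 1 0)
       (PySem.Dict.getD se.2 (PySem.List.pyGetD jr.2 1 0) [] ++ [jr.1]))
  else se

-- one iteration of B's sweep: drop ended indices, add started ones, emit if nonempty
def pvBBody (points : List Int) (ev : PySem.Dict Int (List Int) × PySem.Dict Int (List Int))
    (st : PySem.Set Int × List (List Int × (Int × Int))) (i : Int) :
    PySem.Set Int × List (List Int × (Int × Int)) :=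
  let p := PySem.List.pyGetD points i 0
  let act := PySem.Set.update (PySem.Set.diff st.1 (PySem.Dict.getD ev.2 p [])) (PySem.Dict.getD ev.1 p [])
  (act,
    if act ≠ [] then
      st.2 ++ [(PySem.List.sorted act (fun x => x) false, (p, PySem.List.pyGetD points (i + 1) 0))]
    else st.2)

def region_overlap_alt (regions : List (List Int)) : List (List Int × (Int × Int)) :=
  let points := pvPoints regions
  let ev := (PySem.List.enumerate regions 0).foldl pvEvStep (PySem.Dict.empty, PySem.Dict.empty)
  ((PySem.List.pyRange 0 ((points.length : Int) - 1)).foldl (pvBBody points ev)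
      (PySem.Set.empty, [])).2

-- ===== PRECONDITION & SPEC =====
-- Pre_ excludes exactly the inputs on which A raises IndexError: a region with fewer than two
-- endpoints whose r[0] is evaluated at a breakpoint (r empty, or a singleton below the overall
-- maximum, while there are at least two distinct breakpoints).
def Pre_region_overlap (regions : List (List Int)) : Prop :=
  (PySem.List.dedup regions.flatten).length ≤ 1 ∨
  ∀ r ∈ regions, 2 ≤ r.length ∨ (r.length = 1 ∧ ∀ x ∈ regions.flatten, x ≤ r.headD 0)
instance (regions : List (List Int)) : Decidable (Pre_region_overlap regions) := by
  unfold Pre_region_overlap; infer_instance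

def pvWitness_region_overlap : List (List Int) := [[0, 2], [1, 3]]

def Spec_region_overlap (regions : List (List Int)) (out : List (List Int × (Int × Int))) : Prop :=
  out = region_overlap_alt regions
instance (regions : List (List Int)) (out : List (List Int × (Int × Int))) :
    Decidable (Spec_region_overlap regions out) := by unfold Spec_region_overlap; infer_instance

-- ===== CLAIM (what is proved, stated in full; the proofs are below) =====
def Claim_equal_region_overlap : Prop := ∀ (regions : List (List Int)),
  Dom_region_overlap regions → Pre_region_overlap regions →
  Spec_region_overlap regions (region_overlap regions)

-- ===== LEMMAS AND PROOFS =====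

-- "region k is a proper interval that covers breakpoint p"
def pvActive (regions : List (List Int)) (p : Int) (j : Int) : Prop :=
  ∃ k : Nat, ∃ h : k < regions.length, j = (k : Int) ∧
    2 ≤ regions[k].length ∧
    PySem.List.pyGetD regions[k] 0 0 < PySem.List.pyGetD regions[k] 1 0 ∧
    PySem.List.pyGetD regions[k] 0 0 ≤ p ∧ p < PySem.List.pyGetD regions[k] 1 0

theorem pv_ev_mem (l : List (Int × List Int)) (s e : PySem.Dict Int (List Int)) (v j : Int) :
    (j ∈ ((l.foldl pvEvStep (s, e)).1.getD v [] ) ↔ j ∈ s.getD v [] ∨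
       ∃ jr ∈ l, (2 ≤ jr.2.length ∧ PySem.List.pyGetD jr.2 0 0 < PySem.List.pyGetD jr.2 1 0) ∧
         PySem.List.pyGetD jr.2 0 0 = v ∧ jr.1 = j) ∧
    (j ∈ ((l.foldl pvEvStep (s, e)).2.getD v [] ) ↔ j ∈ e.getD v [] ∨
       ∃ jr ∈ l, (2 ≤ jr.2.length ∧ PySem.List.pyGetD jr.2 0 0 < PySem.List.pyGetD jr.2 1 0) ∧
         PySem.List.pyGetD jr.2 1 0 = v ∧ jr.1 = j) := by
  induction l generalizing s e with
  | nil => simp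
  | cons jr t ih =>
    rw [List.foldl_cons]
    by_cases hv : 2 ≤ jr.2.length ∧ PySem.List.pyGetD jr.2 0 0 < PySem.List.pyGetD jr.2 1 0
    · have hstep : pvEvStep (s, e) jr =
        (PySem.Dict.insert s (PySem.List.pyGetD jr.2 0 0)
           (s.getD (PySem.List.pyGetD jr.2 0 0) [] ++ [jr.1]),
         PySem.Dict.insert e (PySem.List.pyGetD jr.2 1 0)
           (e.getD (PySem.List.pyGetD jr.2 1 0) [] ++ [jr.1])) := by
        simp [pvEvStep, hv]
      rw [hstep]
      constructor
      · rw [(ih _ _).1]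
        rw [PySem.Dict.getD_insert]
        by_cases hk : v = PySem.List.pyGetD jr.2 0 0
        · subst hk
          simp only [if_true, List.mem_append, List.mem_singleton]
          constructor
          · rintro ((h | h) | h)
            · exact Or.inl h
            · exact Or.inr ⟨jr, by simp, hv, rfl, h.symm⟩
            · obtain ⟨jr', hjr', hv', hk', hj'⟩ := h
              exact Or.inr ⟨jr', by simp [hjr'], hv', hk', hj'⟩
          · rintro (h | ⟨jr', hjr', hv', hk', hj'⟩)
            · exact Or.inl (Or.inl h)
            · rcases List.mem_cons.1 hjr' with rfl | hmem
              · exact Or.inl (Or.inr hj'.symm)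
              · exact Or.inr ⟨jr', hmem, hv', hk', hj'⟩
        · simp only [if_neg hk]
          constructor
          · rintro (h | ⟨jr', hjr', hv', hk', hj'⟩)
            · exact Or.inl h
            · exact Or.inr ⟨jr', by simp [hjr'], hv', hk', hj'⟩
          · rintro (h | ⟨jr', hjr', hv', hk', hj'⟩)
            · exact Or.inl h
            · rcases List.mem_cons.1 hjr' with rfl | hmem
              · exact absurd hk'.symm hk
              · exact Or.inr ⟨jr', hmem, hv', hk', hj'⟩
      · rw [(ih _ _).2]
        rw [PySem.Dict.getD_insert]
        by_cases hk : v = PySem.List.pyGetD jr.2 1 0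
        · subst hk
          simp only [if_true, List.mem_append, List.mem_singleton]
          constructor
          · rintro ((h | h) | h)
            · exact Or.inl h
            · exact Or.inr ⟨jr, by simp, hv, rfl, h.symm⟩
            · obtain ⟨jr', hjr', hv', hk', hj'⟩ := h
              exact Or.inr ⟨jr', by simp [hjr'], hv', hk', hj'⟩
          · rintro (h | ⟨jr', hjr', hv', hk', hj'⟩)
            · exact Or.inl (Or.inl h)
            · rcases List.mem_cons.1 hjr' with rfl | hmem
              · exact Or.inl (Or.inr hj'.symm)
              · exact Or.inr ⟨jr', hmem, hv', hk', hj'⟩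
        · simp only [if_neg hk]
          constructor
          · rintro (h | ⟨jr', hjr', hv', hk', hj'⟩)
            · exact Or.inl h
            · exact Or.inr ⟨jr', by simp [hjr'], hv', hk', hj'⟩
          · rintro (h | ⟨jr', hjr', hv', hk', hj'⟩)
            · exact Or.inl h
            · rcases List.mem_cons.1 hjr' with rfl | hmem
              · exact absurd hk'.symm hk
              · exact Or.inr ⟨jr', hmem, hv', hk', hj'⟩
    · have hstep : pvEvStep (s, e) jr = (s, e) := by simp [pvEvStep, hv]
      rw [hstep]
      constructor
      · rw [(ih _ _).1]
        constructor
        · rintro (h | ⟨jr', hjr', hv', hk', hj'⟩)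
          · exact Or.inl h
          · exact Or.inr ⟨jr', by simp [hjr'], hv', hk', hj'⟩
        · rintro (h | ⟨jr', hjr', hv', hk', hj'⟩)
          · exact Or.inl h
          · rcases List.mem_cons.1 hjr' with rfl | hmem
            · exact absurd hv' hv
            · exact Or.inr ⟨jr', hmem, hv', hk', hj'⟩
      · rw [(ih _ _).2]
        constructor
        · rintro (h | ⟨jr', hjr', hv', hk', hj'⟩)
          · exact Or.inl h
          · exact Or.inr ⟨jr', by simp [hjr'], hv', hk', hj'⟩
        · rintro (h | ⟨jr', hjr', hv', hk', hj'⟩)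
          · exact Or.inl h
          · rcases List.mem_cons.1 hjr' with rfl | hmem
            · exact absurd hv' hv
            · exact Or.inr ⟨jr', hmem, hv', hk', hj'⟩

theorem pvPoints_pairwise (regions : List (List Int)) :
    (pvPoints regions).Pairwise (· < ·) :=
  PySem.List.sorted_ofList_pairwise_lt _

theorem pvPoints_mem (regions : List (List Int)) (x : Int) :
    x ∈ pvPoints regions ↔ x ∈ regions.flatten := by
  simp [pvPoints, PySem.List.mem_sorted, PySem.Set.mem_ofList]

theorem pv_mono {l : List Int} (hs : l.Pairwise (· < ·)) {a b : Nat} (hab : a ≤ b)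
    (hb : b < l.length) : l[a]'(lt_of_le_of_lt hab hb) ≤ l[b] := by
  rcases Nat.lt_or_ge a b with h | h
  · exact le_of_lt (List.pairwise_iff_getElem.1 hs a b _ hb h)
  · have : a = b := le_antisymm hab h
    subst this; rfl

theorem pv_gap {l : List Int} (hs : l.Pairwise (· < ·)) {x : Int} (hx : x ∈ l) {k : Nat}
    (hk : k + 1 < l.length) :
    (l[k]'(Nat.lt_of_succ_lt hk) < x ↔ l[k + 1] ≤ x) := by
  obtain ⟨t, ht, rfl⟩ := List.mem_iff_getElem.1 hx
  have mono := fun {a b : Nat} (hab : a ≤ b) (hb : b < l.length) => pv_mono hs hab hb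
  constructor
  · intro h
    by_contra hc
    push Not at hc
    have : t ≤ k := by
      by_contra htk
      push Not at htk
      exact absurd (mono htk ht) (not_le.2 hc)
    exact absurd (mono this (Nat.lt_of_succ_lt hk)) (not_le.2 h)
  · intro h
    have : k + 1 ≤ t := by
      by_contra htk
      push Not at htk
      have : t ≤ k := Nat.lt_succ_iff.1 htk
      have h2 : l[t] ≤ l[k]'(Nat.lt_of_succ_lt hk) := mono this (Nat.lt_of_succ_lt hk)
      have h3 : l[k]'(Nat.lt_of_succ_lt hk) < l[k+1] :=
        List.pairwise_iff_getElem.1 hs k (k+1) _ hk (Nat.lt_succ_self k)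
      omega
    exact lt_of_lt_of_le (List.pairwise_iff_getElem.1 hs k t (Nat.lt_of_succ_lt hk) ht this) rfl.le

theorem pvPoints_len (regions : List (List Int)) :
    (pvPoints regions).length = (PySem.List.dedup regions.flatten).length := by
  simp [pvPoints, PySem.List.length_sorted]

theorem pv_cond_valid (regions : List (List Int)) (hpre : Pre_region_overlap regions)
    {m : Nat} (hm : m + 1 < (pvPoints regions).length) {r : List Int} (hr : r ∈ regions)
    (hc : PySem.List.pyGetD r 0 0 ≤ (pvPoints regions).getD m 0 ∧
          (pvPoints regions).getD m 0 < PySem.List.pyGetD r 1 0) :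
    2 ≤ r.length := by
  have hlen2 : 2 ≤ (pvPoints regions).length := by omega
  rcases hpre with h1 | h2
  · rw [pvPoints_len] at hlen2; omega
  rcases h2 r hr with h | ⟨h1, hall⟩
  · exact h
  obtain ⟨a, rfl⟩ := List.length_eq_one_iff.1 h1
  exfalso
  have hm' : m < (pvPoints regions).length := by omega
  have hpg : (pvPoints regions).getD m 0 = (pvPoints regions)[m] := List.getD_eq_getElem _ _ hm'
  have hpmem : (pvPoints regions)[m] ∈ regions.flatten :=
    (pvPoints_mem regions _).1 (List.getElem_mem hm')
  have ha : PySem.List.pyGetD [a] 0 0 = a := by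
    simp [PySem.List.pyGetD_ofNat']
  have hha : [a].headD 0 = a := rfl
  have hle : (pvPoints regions)[m] ≤ a := by
    have := hall _ hpmem; rwa [hha] at this
  have heq : (pvPoints regions)[m] = a := le_antisymm hle (by rw [ha, hpg] at hc; exact hc.1)
  have hL := Nat.sub_lt (by omega : 0 < (pvPoints regions).length) (by omega : 0 < 1)
  have hlmem : (pvPoints regions)[(pvPoints regions).length - 1] ∈ regions.flatten :=
    (pvPoints_mem regions _).1 (List.getElem_mem hL)
  have hlast : (pvPoints regions)[(pvPoints regions).length - 1] ≤ a := by
    have := hall _ hlmem; rwa [hha] at this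
  have hmono : (pvPoints regions)[m] < (pvPoints regions)[(pvPoints regions).length - 1] :=
    List.pairwise_iff_getElem.1 (pvPoints_pairwise regions) m _ hm' hL (by omega)
  omega

theorem pvOld_mem (regions : List (List Int)) (hpre : Pre_region_overlap regions)
    {m : Nat} (hm : m + 1 < (pvPoints regions).length) (j : Int) :
    j ∈ pvOld regions ((pvPoints regions).getD m 0) ↔
      pvActive regions ((pvPoints regions).getD m 0) j := by
  unfold pvOld pvActive
  simp only [List.mem_map, List.mem_filter, PySem.List.mem_enumerate_iff, decide_eq_true_eq]
  constructor
  · rintro ⟨jr, ⟨⟨k, hk, rfl⟩, hcond⟩, rfl⟩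
    have h2 := pv_cond_valid regions hpre hm (List.getElem_mem hk) hcond
    exact ⟨k, hk, by simp, h2, lt_of_le_of_lt hcond.1 hcond.2, hcond.1, hcond.2⟩
  · rintro ⟨k, hk, rfl, _, _, hle, hlt2⟩
    exact ⟨((0 : Int) + k, regions[k]), ⟨⟨k, hk, rfl⟩, hle, hlt2⟩, by simp⟩

theorem pvOld_pairwise (regions : List (List Int)) (p : Int) :
    (pvOld regions p).Pairwise (· < ·) := by
  unfold pvOld
  rw [List.pairwise_map]
  exact (PySem.List.pairwise_lt_enumerate regions 0).filter _

theorem pvOld_nodup (regions : List (List Int)) (p : Int) : (pvOld regions p).Nodup :=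
  (pvOld_pairwise regions p).imp ne_of_lt

theorem pv_getD_empty (v : Int) : (PySem.Dict.empty : PySem.Dict Int (List Int)).getD v [] = [] := rfl

theorem pv_starts_mem (regions : List (List Int)) (v j : Int) :
    (j ∈ (((PySem.List.enumerate regions 0).foldl pvEvStep
        (PySem.Dict.empty, PySem.Dict.empty)).1.getD v []) ↔
      ∃ k : Nat, ∃ h : k < regions.length, j = (k : Int) ∧
        2 ≤ regions[k].length ∧
        PySem.List.pyGetD regions[k] 0 0 < PySem.List.pyGetD regions[k] 1 0 ∧
        PySem.List.pyGetD regions[k] 0 0 = v) := by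
  rw [(pv_ev_mem (PySem.List.enumerate regions 0) _ _ v j).1]
  rw [pv_getD_empty]
  simp only [List.mem_nil_iff, false_or]
  constructor
  · rintro ⟨jr, hjr, hv, hk, rfl⟩
    obtain ⟨k, hklt, rfl⟩ := (PySem.List.mem_enumerate_iff _ _ _).1 hjr
    exact ⟨k, hklt, by simp, hv.1, hv.2, hk⟩
  · rintro ⟨k, hklt, rfl, h2, hlt, hv⟩
    exact ⟨((0 : Int) + k, regions[k]), (PySem.List.mem_enumerate_iff _ _ _).2 ⟨k, hklt, rfl⟩,
      ⟨h2, hlt⟩, hv, by simp⟩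

theorem pv_ends_mem (regions : List (List Int)) (v j : Int) :
    (j ∈ (((PySem.List.enumerate regions 0).foldl pvEvStep
        (PySem.Dict.empty, PySem.Dict.empty)).2.getD v []) ↔
      ∃ k : Nat, ∃ h : k < regions.length, j = (k : Int) ∧
        2 ≤ regions[k].length ∧
        PySem.List.pyGetD regions[k] 0 0 < PySem.List.pyGetD regions[k] 1 0 ∧
        PySem.List.pyGetD regions[k] 1 0 = v) := by
  rw [(pv_ev_mem (PySem.List.enumerate regions 0) _ _ v j).2]
  rw [pv_getD_empty]
  simp only [List.mem_nil_iff, false_or]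
  constructor
  · rintro ⟨jr, hjr, hv, hk, rfl⟩
    obtain ⟨k, hklt, rfl⟩ := (PySem.List.mem_enumerate_iff _ _ _).1 hjr
    exact ⟨k, hklt, by simp, hv.1, hv.2, hk⟩
  · rintro ⟨k, hklt, rfl, h2, hlt, hv⟩
    exact ⟨((0 : Int) + k, regions[k]), (PySem.List.mem_enumerate_iff _ _ _).2 ⟨k, hklt, rfl⟩,
      ⟨h2, hlt⟩, hv, by simp⟩

def pvEv (regions : List (List Int)) : PySem.Dict Int (List Int) × PySem.Dict Int (List Int) :=
  (PySem.List.enumerate regions 0).foldl pvEvStep (PySem.Dict.empty, PySem.Dict.empty)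

def pvBFold (regions : List (List Int)) (m : Nat) :
    PySem.Set Int × List (List Int × (Int × Int)) :=
  (PySem.List.pyRange 0 (m : Int)).foldl (pvBBody (pvPoints regions) (pvEv regions))
    (PySem.Set.empty, [])

def pvAFold (regions : List (List Int)) (m : Nat) : List (List Int × (Int × Int)) :=
  (PySem.List.pyRange 0 (m : Int)).foldl (pvABody regions (pvPoints regions)) []

theorem pv_monoD {l : List Int} (hs : l.Pairwise (· < ·)) {a b : Nat} (hab : a ≤ b)
    (hb : b < l.length) : l.getD a 0 ≤ l.getD b 0 := by
  rw [List.getD_eq_getElem _ _ (lt_of_le_of_lt hab hb), List.getD_eq_getElem _ _ hb]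
  exact pv_mono hs hab hb

theorem pv_gapD {l : List Int} (hs : l.Pairwise (· < ·)) {x : Int} (hx : x ∈ l) {k : Nat}
    (hk : k + 1 < l.length) : (l.getD k 0 < x ↔ l.getD (k + 1) 0 ≤ x) := by
  rw [List.getD_eq_getElem _ _ (Nat.lt_of_succ_lt hk), List.getD_eq_getElem _ _ hk]
  exact pv_gap hs hx hk

theorem pv_minD {l : List Int} (hs : l.Pairwise (· < ·)) {x : Int} (hx : x ∈ l) :
    l.getD 0 0 ≤ x := by
  obtain ⟨t, ht, rfl⟩ := List.mem_iff_getElem.1 hx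
  rw [List.getD_eq_getElem _ _ (by omega)]
  exact pv_mono hs (by omega) ht

theorem pv_main (regions : List (List Int)) (hpre : Pre_region_overlap regions) :
    ∀ m : Nat, (m = 0 ∨ m < (pvPoints regions).length) →
    (pvBFold regions m).2 = pvAFold regions m ∧
    (pvBFold regions m).1.Nodup ∧
    (∀ j : Int, j ∈ (pvBFold regions m).1 ↔
      0 < m ∧ pvActive regions ((pvPoints regions).getD (m - 1) 0) j) := by
  intro m
  induction m with
  | zero =>
    intro _
    unfold pvBFold pvAFold
    rw [PySem.List.pyRange_one_eq_nil (by norm_num)]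
    refine ⟨rfl, List.nodup_nil, fun j => ?_⟩
    simp [PySem.Set.empty]
  | succ m ih =>
    intro hm
    have hmlt : m + 1 < (pvPoints regions).length := by omega
    obtain ⟨ihout, ihnd, ihmem⟩ := ih (by omega)
    have hrange : PySem.List.pyRange 0 ((m : Int) + 1) =
        PySem.List.pyRange 0 (m : Int) ++ [(m : Int)] :=
      PySem.List.pyRange_one_succ_right (by positivity)
    have hcast : ((m + 1 : Nat) : Int) = (m : Int) + 1 := by push_cast; ring
    have hBstep : pvBFold regions (m + 1) =
        pvBBody (pvPoints regions) (pvEv regions) (pvBFold regions m) (m : Int) := by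
      unfold pvBFold
      rw [hcast, hrange, List.foldl_append]
      rfl
    have hAstep : pvAFold regions (m + 1) =
        pvABody regions (pvPoints regions) (pvAFold regions m) (m : Int) := by
      unfold pvAFold
      rw [hcast, hrange, List.foldl_append]
      rfl
    rw [hBstep, hAstep]
    set ev := pvEv regions with hev
    set stB := pvBFold regions m with hstB
    set accA := pvAFold regions m with haccA
    -- the point handled at this step
    have hpg : PySem.List.pyGetD (pvPoints regions) (m : Int) 0 = (pvPoints regions).getD m 0 :=
      PySem.List.pyGetD_natCast _ _ _
    have hpidx : (pvPoints regions).getD m 0 = (pvPoints regions)[m]'(by omega) :=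
      List.getD_eq_getElem _ _ (by omega)
    -- membership in the new active set
    have actmem : ∀ j : Int,
        (j ∈ PySem.Set.update (PySem.Set.diff stB.1
            (ev.2.getD (PySem.List.pyGetD (pvPoints regions) (m : Int) 0) []))
            (ev.1.getD (PySem.List.pyGetD (pvPoints regions) (m : Int) 0) [])) ↔
        pvActive regions ((pvPoints regions).getD m 0) j := by
      intro j
      rw [PySem.Set.mem_update, PySem.Set.mem_diff, hpg]
      rw [hev]
      unfold pvEv
      rw [pv_starts_mem, pv_ends_mem, ihmem]
      constructor
      · rintro (⟨⟨hm0, k, hk, rfl, h2, hlt, hle, hlt2⟩, hne⟩ | ⟨k, hk, rfl, h2, hlt, hst⟩)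
        · -- previously active, not ended here
          refine ⟨k, hk, rfl, h2, hlt, ?_, ?_⟩
          · -- r0 ≤ points[m]
            exact le_trans hle (pv_monoD (pvPoints_pairwise regions) (by omega) (by omega))
          · -- points[m] < r1
            have hr1mem : PySem.List.pyGetD regions[k] 1 0 ∈ pvPoints regions := by
              rw [pvPoints_mem]
              refine List.mem_flatten.2 ⟨regions[k], List.getElem_mem hk, ?_⟩
              have h1lt : 1 < regions[k].length := by omega
              have : PySem.List.pyGetD regions[k] 1 0 = regions[k][1] := by
                rw [PySem.List.pyGetD_ofNat', List.getD_eq_getElem _ _ h1lt]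
              rw [this]; exact List.getElem_mem h1lt
            have hgap := pv_gapD (pvPoints_pairwise regions) hr1mem
              (by omega : (m - 1) + 1 < (pvPoints regions).length)
            have hmm : (m - 1) + 1 = m := by omega
            rw [hmm] at hgap
            have hle2 : (pvPoints regions).getD m 0 ≤ PySem.List.pyGetD regions[k] 1 0 :=
              hgap.1 hlt2
            have hnem : PySem.List.pyGetD regions[k] 1 0 ≠ (pvPoints regions).getD m 0 := by
              intro heq
              exact hne ⟨k, hk, rfl, h2, hlt, heq⟩
            omega
        · -- started here
          refine ⟨k, hk, rfl, h2, hlt, le_of_eq hst, ?_⟩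
          rw [← hst]; exact hlt
      · rintro ⟨k, hk, rfl, h2, hlt, hle, hlt2⟩
        by_cases hst : PySem.List.pyGetD regions[k] 0 0 = (pvPoints regions).getD m 0
        · exact Or.inr ⟨k, hk, rfl, h2, hlt, hst⟩
        · left
          have hr0mem : PySem.List.pyGetD regions[k] 0 0 ∈ pvPoints regions := by
            rw [pvPoints_mem]
            refine List.mem_flatten.2 ⟨regions[k], List.getElem_mem hk, ?_⟩
            have h0lt : 0 < regions[k].length := by omega
            have : PySem.List.pyGetD regions[k] 0 0 = regions[k][0] := by
              rw [PySem.List.pyGetD_ofNat', List.getD_eq_getElem _ _ h0lt]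
            rw [this]; exact List.getElem_mem h0lt
          have hr0lt : PySem.List.pyGetD regions[k] 0 0 < (pvPoints regions).getD m 0 :=
            lt_of_le_of_ne hle hst
          have hm0 : 0 < m := by
            by_contra h0
            push Not at h0
            interval_cases m
            have := pv_minD (pvPoints_pairwise regions) hr0mem
            omega
          have hgap := pv_gapD (pvPoints_pairwise regions) hr0mem
            (by omega : (m - 1) + 1 < (pvPoints regions).length)
          have hmm : (m - 1) + 1 = m := by omega
          rw [hmm] at hgap
          have hr0le : PySem.List.pyGetD regions[k] 0 0 ≤ (pvPoints regions).getD (m - 1) 0 := by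
            by_contra hcc
            push Not at hcc
            have := hgap.1 hcc
            omega
          have hprevlt : (pvPoints regions).getD (m - 1) 0 < PySem.List.pyGetD regions[k] 1 0 := by
            have hmono := pv_monoD (pvPoints_pairwise regions)
              (by omega : m - 1 ≤ m) (by omega : m < (pvPoints regions).length)
            omega
          refine ⟨⟨hm0, k, hk, rfl, h2, hlt, hr0le, hprevlt⟩, ?_⟩
          · rintro ⟨k', hk', hkeq, _, _, hend⟩
            have : k' = k := by exact_mod_cast hkeq.symm
            subst this
            rw [hend] at hlt2
            exact lt_irrefl _ hlt2
    -- unfold one step of both loops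
    show (pvBBody (pvPoints regions) ev stB (m : Int)).2 = pvABody regions (pvPoints regions) accA (m : Int) ∧ _ ∧ _
    have hnd' : (pvBBody (pvPoints regions) ev stB (m : Int)).1.Nodup := by
      simp only [pvBBody]
      exact PySem.Set.nodup_update _ _ (PySem.Set.nodup_diff _ _ ihnd)
    have holdmem := fun j => pvOld_mem regions hpre (by omega : m + 1 < (pvPoints regions).length) j
    have hperm : (pvOld regions ((pvPoints regions).getD m 0)).Perm
        (PySem.Set.update (PySem.Set.diff stB.1
            (ev.2.getD (PySem.List.pyGetD (pvPoints regions) (m : Int) 0) []))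
            (ev.1.getD (PySem.List.pyGetD (pvPoints regions) (m : Int) 0) [])) := by
      refine (List.perm_ext_iff_of_nodup (pvOld_nodup _ _) ?_).2 ?_
      · exact PySem.Set.nodup_update _ _ (PySem.Set.nodup_diff _ _ ihnd)
      · intro a
        rw [holdmem a, actmem a]
    have hsort : PySem.List.sorted (PySem.Set.update (PySem.Set.diff stB.1
            (ev.2.getD (PySem.List.pyGetD (pvPoints regions) (m : Int) 0) []))
            (ev.1.getD (PySem.List.pyGetD (pvPoints regions) (m : Int) 0) []))
        (fun x => x) false = pvOld regions ((pvPoints regions).getD m 0) :=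
      PySem.List.sorted_eq_of_perm_of_pairwise_lt _ _ _ hperm (pvOld_pairwise _ _)
    have hlen : (pvOld regions ((pvPoints regions).getD m 0)).length =
        (PySem.Set.update (PySem.Set.diff stB.1
            (ev.2.getD (PySem.List.pyGetD (pvPoints regions) (m : Int) 0) []))
            (ev.1.getD (PySem.List.pyGetD (pvPoints regions) (m : Int) 0) [])).length :=
      hperm.length_eq
    rw [hpg] at hsort hlen
    refine ⟨?_, hnd', ?_⟩
    · simp only [pvBBody, pvABody]
      rw [hpg, hsort, ihout]
      by_cases hne : pvOld regions ((pvPoints regions).getD m 0) = []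
      · rw [if_neg, if_neg]
        · rw [hne]; simp
        · simp only [ne_eq, Decidable.not_not]
          rw [← List.length_eq_zero_iff] at hne ⊢
          omega
      · rw [if_pos, if_pos]
        · rw [← List.length_eq_zero_iff] at hne; omega
        · simp only [ne_eq]
          rw [← List.length_eq_zero_iff] at hne ⊢
          omega
    · intro j
      simp only [pvBBody]
      rw [actmem j]
      have : (m + 1) - 1 = m := by omega
      rw [this]
      simp

-- ===== VERDICT (by name: the statement is the Claim_ definition above) =====
theorem region_overlap_spec : Claim_equal_region_overlap := by
  intro regions _ hpre
  unfold Spec_region_overlap region_overlap region_overlap_alt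
  dsimp only
  cases hn : (pvPoints regions).length with
  | zero =>
    rw [PySem.List.pyRange_one_eq_nil (by norm_num : ((0 : Nat) : Int) - 1 ≤ 0)]
    rfl
  | succ n =>
    have hc : ((n + 1 : Nat) : Int) - 1 = ((n : Nat) : Int) := by push_cast; ring
    rw [hc]
    have h := (pv_main regions hpre n (by omega)).1
    exact h.symm
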